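-- pv_equiv track=rewrite | github.com/augustin64/advent-of-code | 2022/day12.py | update_heights
-- ===== SOURCE A (Python) =====
-- import copy # pour deepcopy
--
-- def better_height(moves, heights, i, j, sample):
--     available = []
--     if heights[i][j] != -1:
--         available.append(heights[i][j])
--     if i > 0 :
--         if ('down' in moves[i-1][j] and heights[i-1][j] != -1):
--             available.append(heights[i-1][j]+1)
--     if j > 0:
--         if ('right' in moves[i][j-1] and heights[i][j-1] != -1):
--             available.append(heights[i][j-1]+1)
--     if i < len(sample)-1 :
--         if ('up' in moves[i+1][j] and heights[i+1][j] != -1):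
--             available.append(heights[i+1][j]+1)
--     if j < len(sample[0])-1:
--         if ('left' in moves[i][j+1] and heights[i][j+1] != -1):
--             available.append(heights[i][j+1]+1)
--
--     if len(available) == 0:
--         return -1
--     return min(available)
--
-- def update_heights(moves, heights, sample):
--     changed = False
--     heights_c = copy.deepcopy(heights)
--     for i in range(len(sample)):
--         for j in range(len(sample[0])):
--             heights_c[i][j] = better_height(moves, heights, i, j, sample)
--             changed = changed or (heights_c[i][j] != heights[i][j])
--
--     return heights_c, changed
-- ===== SOURCE B (Python) =====
-- def update_heights(moves, heights, sample):
--     # Scatter formulation: each live cell pushes h+1 to the neighbors its moves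
--     # allow, relaxing a per-cell optional minimum; gather-free single sweep.
--     n = len(sample)
--     m = len(sample[0]) if n > 0 else 0
--     best = [[(heights[i][j] if heights[i][j] != -1 else None) for j in range(m)]
--             for i in range(n)]
--     for a in range(n):
--         for b in range(m):
--             h = heights[a][b]
--             if h != -1:
--                 for d, i, j in (("down", a + 1, b), ("up", a - 1, b),
--                                 ("right", a, b + 1), ("left", a, b - 1)):
--                     if 0 <= i < n and 0 <= j < m and d in moves[a][b]:
--                         cur = best[i][j]
--                         best[i][j] = h + 1 if cur is None else min(cur, h + 1)
--     res = [row[:] for row in heights]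
--     changed = False
--     for i in range(n):
--         for j in range(m):
--             v = -1 if best[i][j] is None else best[i][j]
--             res[i][j] = v
--             changed = changed or v != heights[i][j]
--     return res, changed
-- ===== Notes on version B (the rewrite author's own statement) =====
-- stated objective: alternative
-- what changed: A computes each cell by gathering candidate values from its four neighbours and taking min(available); B instead does a scatter sweep: every live cell pushes h+1 to the in-bounds neighbours its moves allow, relaxing a per-cell optional minimum, then the relaxed grid is written back and compared.
import Mathlib
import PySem

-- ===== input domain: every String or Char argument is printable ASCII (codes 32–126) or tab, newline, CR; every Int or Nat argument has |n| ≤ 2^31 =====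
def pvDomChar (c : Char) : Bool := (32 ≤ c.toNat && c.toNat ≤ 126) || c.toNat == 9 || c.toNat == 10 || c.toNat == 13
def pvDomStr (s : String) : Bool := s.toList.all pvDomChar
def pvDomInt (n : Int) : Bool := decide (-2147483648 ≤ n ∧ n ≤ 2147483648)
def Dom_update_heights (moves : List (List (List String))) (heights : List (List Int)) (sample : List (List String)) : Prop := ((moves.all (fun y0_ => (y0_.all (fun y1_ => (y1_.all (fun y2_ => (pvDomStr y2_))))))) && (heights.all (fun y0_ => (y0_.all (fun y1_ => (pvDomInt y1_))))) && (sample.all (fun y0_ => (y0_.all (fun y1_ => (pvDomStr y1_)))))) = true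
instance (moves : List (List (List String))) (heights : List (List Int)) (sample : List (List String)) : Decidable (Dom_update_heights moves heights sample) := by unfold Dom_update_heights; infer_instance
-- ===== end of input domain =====

-- B replaces A's per-cell gather (each cell pulls candidate values from its four
-- neighbours) by a scatter sweep (each live cell pushes h+1 to the neighbours its
-- moves allow, relaxing a per-cell optional minimum); objective: alternative
-- decomposition of the same O(n*m) relaxation.

-- ===== PORT A =====
-- shared 2-d list access/update primitives (plain indexing, used by both ports;
-- out-of-range reads return a default — Pre_ excludes the inputs where Python indexes out of range)
def pvGet2 (g : List (List Int)) (i j : Nat) : Int := (g.getD i []).getD j 0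
def pvGetM (ms : List (List (List String))) (i j : Nat) : List String := (ms.getD i []).getD j []
def pvSet2 (g : List (List Int)) (i j : Nat) (v : Int) : List (List Int) :=
  g.set i ((g.getD i []).set j v)

-- the `available` list of Python better_height, built by the same guarded appends
def bhAvail (moves : List (List (List String))) (heights : List (List Int))
    (i j : Nat) (sample : List (List String)) : List Int :=
  ((((if pvGet2 heights i j ≠ -1 then [pvGet2 heights i j] else [])
    ++ (if 0 < i ∧ (pvGetM moves (i-1) j).contains "down" = true ∧ pvGet2 heights (i-1) j ≠ -1
        then [pvGet2 heights (i-1) j + 1] else []))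
    ++ (if 0 < j ∧ (pvGetM moves i (j-1)).contains "right" = true ∧ pvGet2 heights i (j-1) ≠ -1
        then [pvGet2 heights i (j-1) + 1] else []))
    ++ (if (i : Int) < (sample.length : Int) - 1 ∧ (pvGetM moves (i+1) j).contains "up" = true ∧ pvGet2 heights (i+1) j ≠ -1
        then [pvGet2 heights (i+1) j + 1] else []))
    ++ (if (j : Int) < ((sample.headD []).length : Int) - 1 ∧ (pvGetM moves i (j+1)).contains "left" = true ∧ pvGet2 heights i (j+1) ≠ -1
        then [pvGet2 heights i (j+1) + 1] else [])

def better_height (moves : List (List (List String))) (heights : List (List Int))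
    (i j : Nat) (sample : List (List String)) : Int :=
  if (bhAvail moves heights i j sample).length = 0 then -1
  else (PySem.List.min? (bhAvail moves heights i j sample) (fun x => x)).getD 0

def update_heights (moves : List (List (List String))) (heights : List (List Int))
    (sample : List (List String)) : List (List Int) × Bool :=
  (List.range sample.length).foldl (fun (st : List (List Int) × Bool) i =>
      (List.range (sample.headD []).length).foldl (fun st j =>
        let v := better_height moves heights i j sample
        (pvSet2 st.1 i j v, st.2 || decide (v ≠ pvGet2 heights i j))) st)
    (heights, false)

-- ===== PORT B =====
def pvOGet (g : List (List (Option Int))) (i j : Nat) : Option Int := (g.getD i []).getD j none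
def pvOSet (g : List (List (Option Int))) (i j : Nat) (v : Option Int) : List (List (Option Int)) :=
  g.set i ((g.getD i []).set j v)

-- one relaxation of target (ti,tj) with value h+1, guarded by bounds and the move test
def pvRelaxAt (best : List (List (Option Int))) (h : Int) (n m : Nat)
    (ti tj : Int) (mv : List String) (d : String) : List (List (Option Int)) :=
  if 0 ≤ ti ∧ ti < (n : Int) ∧ 0 ≤ tj ∧ tj < (m : Int) ∧ mv.contains d = true then
    pvOSet best ti.toNat tj.toNat
      (match pvOGet best ti.toNat tj.toNat with
       | none => some (h + 1)
       | some c => some (min c (h + 1)))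
  else best

-- body of B's scatter loop: cell (a,b), if alive, pushes h+1 to its four targets
def stepB (moves : List (List (List String))) (heights : List (List Int)) (n m : Nat)
    (best : List (List (Option Int))) (a b : Nat) : List (List (Option Int)) :=
  if pvGet2 heights a b ≠ -1 then
    [("down", (a : Int) + 1, (b : Int)), ("up", (a : Int) - 1, (b : Int)),
     ("right", (a : Int), (b : Int) + 1), ("left", (a : Int), (b : Int) - 1)].foldl
      (fun best dij => pvRelaxAt best (pvGet2 heights a b) n m dij.2.1 dij.2.2 (pvGetM moves a b) dij.1) best
  else best

def update_heights_alt (moves : List (List (List String))) (heights : List (List Int))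
    (sample : List (List String)) : List (List Int) × Bool :=
  let n := sample.length
  let m := if 0 < n then (sample.headD []).length else 0
  let init : List (List (Option Int)) :=
    (List.range n).map (fun i => (List.range m).map (fun j =>
      if pvGet2 heights i j ≠ -1 then some (pvGet2 heights i j) else none))
  let best := (List.range n).foldl (fun best a =>
      (List.range m).foldl (fun best b => stepB moves heights n m best a b) best) init
  (List.range n).foldl (fun (st : List (List Int) × Bool) i =>
      (List.range m).foldl (fun st j =>
        let v := (pvOGet best i j).getD (-1)
        (pvSet2 st.1 i j v, st.2 || decide (v ≠ pvGet2 heights i j))) st)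
    (heights, false)

-- ===== PRECONDITION & SPEC =====
-- Pre_ excludes exactly the shape mismatches on which Python A raises IndexError: when the
-- sample block is non-empty every block cell must exist in heights, and — unless the block is
-- 1x1, where no moves cell is ever indexed — every block cell must exist in moves as well.
def Pre_update_heights (moves : List (List (List String))) (heights : List (List Int))
    (sample : List (List String)) : Prop :=
  (sample.headD []).length = 0 ∨
  (sample.length ≤ heights.length ∧
   (∀ i, i < sample.length → (sample.headD []).length ≤ (heights.getD i []).length) ∧
   ((sample.length = 1 ∧ (sample.headD []).length = 1) ∨
    (sample.length ≤ moves.length ∧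
     ∀ i, i < sample.length → (sample.headD []).length ≤ (moves.getD i []).length)))
instance (moves : List (List (List String))) (heights : List (List Int)) (sample : List (List String)) : Decidable (Pre_update_heights moves heights sample) := by unfold Pre_update_heights; infer_instance

def pvWitness_update_heights : List (List (List String)) × List (List Int) × List (List String) :=
  ([[["down"], ["left"]], [["up"], []]], [[0, 3], [-1, 5]], [["a", "b"], ["c", "d"]])

def Spec_update_heights (moves : List (List (List String))) (heights : List (List Int)) (sample : List (List String)) (out : List (List Int) × Bool) : Prop := out = update_heights_alt moves heights sample
instance (moves : List (List (List String))) (heights : List (List Int)) (sample : List (List String)) (out : List (List Int) × Bool) : Decidable (Spec_update_heights moves heights sample out) := by unfold Spec_update_heights; infer_instance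

-- ===== CLAIM (what is proved, stated in full; the proofs are below) =====
def Claim_equal_update_heights : Prop := ∀ (moves : List (List (List String))) (heights : List (List Int)) (sample : List (List String)), Dom_update_heights moves heights sample → Pre_update_heights moves heights sample → Spec_update_heights moves heights sample (update_heights moves heights sample)

-- ===== LEMMAS AND PROOFS =====

/-- Option-minimum relaxation step: `relaxStep v (some x)` lowers `v` to at most `x`. -/
def relaxStep (v c : Option Int) : Option Int :=
  match c with
  | none => v
  | some x => match v with
    | none => some x
    | some cur => some (min cur x)

/-- grid `g` has `n` rows of length `m` -/
def pvShape (g : List (List (Option Int))) (n m : Nat) : Prop :=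
  g.length = n ∧ ∀ i, i < n → (g.getD i []).length = m

-- per-direction contribution of source cell s to target (i,j) (Nat coordinates)
def cDown (moves : List (List (List String))) (heights : List (List Int)) (i j : Nat) (s : Nat × Nat) : Option Int :=
  if pvGet2 heights s.1 s.2 ≠ -1 ∧ s.1 + 1 = i ∧ s.2 = j ∧ (pvGetM moves s.1 s.2).contains "down" = true
  then some (pvGet2 heights s.1 s.2 + 1) else none
def cUp (moves : List (List (List String))) (heights : List (List Int)) (i j : Nat) (s : Nat × Nat) : Option Int :=
  if pvGet2 heights s.1 s.2 ≠ -1 ∧ i + 1 = s.1 ∧ s.2 = j ∧ (pvGetM moves s.1 s.2).contains "up" = true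
  then some (pvGet2 heights s.1 s.2 + 1) else none
def cRight (moves : List (List (List String))) (heights : List (List Int)) (i j : Nat) (s : Nat × Nat) : Option Int :=
  if pvGet2 heights s.1 s.2 ≠ -1 ∧ s.1 = i ∧ s.2 + 1 = j ∧ (pvGetM moves s.1 s.2).contains "right" = true
  then some (pvGet2 heights s.1 s.2 + 1) else none
def cLeft (moves : List (List (List String))) (heights : List (List Int)) (i j : Nat) (s : Nat × Nat) : Option Int :=
  if pvGet2 heights s.1 s.2 ≠ -1 ∧ s.1 = i ∧ j + 1 = s.2 ∧ (pvGetM moves s.1 s.2).contains "left" = true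
  then some (pvGet2 heights s.1 s.2 + 1) else none

def cList (moves : List (List (List String))) (heights : List (List Int)) (i j : Nat) (s : Nat × Nat) : List (Option Int) :=
  [cDown moves heights i j s, cUp moves heights i j s, cRight moves heights i j s, cLeft moves heights i j s]

def toMin (l : List Int) : Option Int := PySem.List.min? l (fun y => y)

-- ---- grid get/set lemmas ----

theorem getD_set_self' {α : Type} (l : List α) (i : Nat) (x d : α) (h : i < l.length) :
    (l.set i x).getD i d = x := by
  simp [List.getD, List.getElem?_set_self h]

theorem getD_set_ne' {α : Type} (l : List α) (i k : Nat) (x : α) (d : α) (h : i ≠ k) :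
    (l.set i x).getD k d = l.getD k d := by
  simp [List.getD, List.getElem?_set_ne h]

theorem pvOGet_pvOSet_self (g : List (List (Option Int))) (a b : Nat) (v : Option Int)
    (ha : a < g.length) (hb : b < (g.getD a []).length) :
    pvOGet (pvOSet g a b v) a b = v := by
  unfold pvOGet pvOSet
  rw [getD_set_self' _ _ _ _ ha]
  exact getD_set_self' _ _ _ _ hb

theorem pvOGet_pvOSet_ne (g : List (List (Option Int))) (a b i j : Nat) (v : Option Int)
    (hne : a ≠ i ∨ b ≠ j) :
    pvOGet (pvOSet g a b v) i j = pvOGet g i j := by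
  unfold pvOGet pvOSet
  by_cases hai : a = i
  · subst hai
    rcases hne with h | h
    · exact absurd rfl h
    · by_cases hlen : a < g.length
      · rw [getD_set_self' _ _ _ _ hlen, getD_set_ne' _ _ _ _ _ h]
      · rw [List.set_eq_of_length_le (by omega)]
  · rw [getD_set_ne' _ _ _ _ _ hai]

theorem pvOSet_row_length (g : List (List (Option Int))) (a b i : Nat) (v : Option Int) :
    ((pvOSet g a b v).getD i []).length = ((g.getD i []).length) := by
  unfold pvOSet
  by_cases hai : a = i
  · subst hai
    by_cases hlen : a < g.length
    · rw [getD_set_self' _ _ _ _ hlen]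
      simp
    · rw [List.set_eq_of_length_le (by omega)]
  · rw [getD_set_ne' _ _ _ _ _ hai]

theorem pvShape_pvOSet (g : List (List (Option Int))) (n m a b : Nat) (v : Option Int)
    (h : pvShape g n m) : pvShape (pvOSet g a b v) n m :=
  ⟨by simpa [pvOSet] using h.1, fun i hi => by rw [pvOSet_row_length]; exact h.2 i hi⟩

theorem match_relax (v : Option Int) (x : Int) :
    (match v with | none => some x | some c => some (min c x)) = relaxStep v (some x) := by
  cases v <;> rfl

theorem pvShape_pvRelaxAt (best : List (List (Option Int))) (h : Int) (n m : Nat)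
    (ti tj : Int) (mv : List String) (d : String) (hsh : pvShape best n m) :
    pvShape (pvRelaxAt best h n m ti tj mv d) n m := by
  unfold pvRelaxAt
  split
  · exact pvShape_pvOSet _ _ _ _ _ _ hsh
  · exact hsh

theorem pvOGet_pvRelaxAt (best : List (List (Option Int))) (h : Int) (n m : Nat)
    (ti tj : Int) (mv : List String) (d : String) (i j : Nat)
    (hsh : pvShape best n m) (hi : i < n) (hj : j < m) :
    pvOGet (pvRelaxAt best h n m ti tj mv d) i j =
      if ti = (i : Int) ∧ tj = (j : Int) ∧ mv.contains d = true
      then relaxStep (pvOGet best i j) (some (h + 1))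
      else pvOGet best i j := by
  unfold pvRelaxAt
  by_cases hc : ti = (i : Int) ∧ tj = (j : Int) ∧ mv.contains d = true
  · obtain ⟨h1, h2, h3⟩ := hc
    rw [if_pos (show 0 ≤ ti ∧ ti < (n : Int) ∧ 0 ≤ tj ∧ tj < (m : Int) ∧ mv.contains d = true from
      ⟨by omega, by omega, by omega, by omega, h3⟩), if_pos ⟨h1, h2, h3⟩]
    have e1 : ti.toNat = i := by omega
    have e2 : tj.toNat = j := by omega
    rw [e1, e2, match_relax,
      pvOGet_pvOSet_self _ _ _ _ (by rw [hsh.1]; exact hi) (by rw [hsh.2 i hi]; exact hj)]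
  · rw [if_neg hc]
    by_cases hg : 0 ≤ ti ∧ ti < (n : Int) ∧ 0 ≤ tj ∧ tj < (m : Int) ∧ mv.contains d = true
    · rw [if_pos hg]
      obtain ⟨g1, g2, g3, g4, g5⟩ := hg
      have hne : ti.toNat ≠ i ∨ tj.toNat ≠ j := by
        by_contra hcon
        push_neg at hcon
        exact hc ⟨by omega, by omega, g5⟩
      exact pvOGet_pvOSet_ne _ _ _ _ _ _ hne
    · rw [if_neg hg]

-- converting one guarded relaxation into one per-direction contribution

theorem relax_if_down (moves : List (List (List String))) (heights : List (List Int))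
    (i j a b : Nat) (v : Option Int) (hh : pvGet2 heights a b ≠ -1) :
    (if (a : Int) + 1 = (i : Int) ∧ (b : Int) = (j : Int) ∧ (pvGetM moves a b).contains "down" = true
     then relaxStep v (some (pvGet2 heights a b + 1)) else v)
    = relaxStep v (cDown moves heights i j (a, b)) := by
  unfold cDown
  by_cases hd : a + 1 = i ∧ b = j ∧ (pvGetM moves a b).contains "down" = true
  · rw [if_pos ⟨by omega, by omega, hd.2.2⟩, if_pos ⟨hh, hd⟩]
  · rw [if_neg (by intro hx; exact hd ⟨by omega, by omega, hx.2.2⟩),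
      if_neg (by intro hx; exact hd hx.2)]
    rfl

theorem relax_if_up (moves : List (List (List String))) (heights : List (List Int))
    (i j a b : Nat) (v : Option Int) (hh : pvGet2 heights a b ≠ -1) :
    (if (a : Int) - 1 = (i : Int) ∧ (b : Int) = (j : Int) ∧ (pvGetM moves a b).contains "up" = true
     then relaxStep v (some (pvGet2 heights a b + 1)) else v)
    = relaxStep v (cUp moves heights i j (a, b)) := by
  unfold cUp
  by_cases hd : i + 1 = a ∧ b = j ∧ (pvGetM moves a b).contains "up" = true
  · rw [if_pos ⟨by omega, by omega, hd.2.2⟩, if_pos ⟨hh, hd⟩]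
  · rw [if_neg (by intro hx; exact hd ⟨by omega, by omega, hx.2.2⟩),
      if_neg (by intro hx; exact hd hx.2)]
    rfl

theorem relax_if_right (moves : List (List (List String))) (heights : List (List Int))
    (i j a b : Nat) (v : Option Int) (hh : pvGet2 heights a b ≠ -1) :
    (if (a : Int) = (i : Int) ∧ (b : Int) + 1 = (j : Int) ∧ (pvGetM moves a b).contains "right" = true
     then relaxStep v (some (pvGet2 heights a b + 1)) else v)
    = relaxStep v (cRight moves heights i j (a, b)) := by
  unfold cRight
  by_cases hd : a = i ∧ b + 1 = j ∧ (pvGetM moves a b).contains "right" = true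
  · rw [if_pos ⟨by omega, by omega, hd.2.2⟩, if_pos ⟨hh, hd⟩]
  · rw [if_neg (by intro hx; exact hd ⟨by omega, by omega, hx.2.2⟩),
      if_neg (by intro hx; exact hd hx.2)]
    rfl

theorem relax_if_left (moves : List (List (List String))) (heights : List (List Int))
    (i j a b : Nat) (v : Option Int) (hh : pvGet2 heights a b ≠ -1) :
    (if (a : Int) = (i : Int) ∧ (b : Int) - 1 = (j : Int) ∧ (pvGetM moves a b).contains "left" = true
     then relaxStep v (some (pvGet2 heights a b + 1)) else v)
    = relaxStep v (cLeft moves heights i j (a, b)) := by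
  unfold cLeft
  by_cases hd : a = i ∧ j + 1 = b ∧ (pvGetM moves a b).contains "left" = true
  · rw [if_pos ⟨by omega, by omega, hd.2.2⟩, if_pos ⟨hh, hd⟩]
  · rw [if_neg (by intro hx; exact hd ⟨by omega, by omega, hx.2.2⟩),
      if_neg (by intro hx; exact hd hx.2)]
    rfl

theorem relaxStep_none (v : Option Int) : relaxStep v none = v := rfl

theorem pvShape_stepB (moves : List (List (List String))) (heights : List (List Int))
    (n m : Nat) (best : List (List (Option Int))) (a b : Nat) (hsh : pvShape best n m) :
    pvShape (stepB moves heights n m best a b) n m := by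
  unfold stepB
  split
  · simp only [List.foldl_cons, List.foldl_nil]
    exact pvShape_pvRelaxAt _ _ _ _ _ _ _ _ (pvShape_pvRelaxAt _ _ _ _ _ _ _ _
      (pvShape_pvRelaxAt _ _ _ _ _ _ _ _ (pvShape_pvRelaxAt _ _ _ _ _ _ _ _ hsh)))
  · exact hsh

theorem pvOGet_stepB (moves : List (List (List String))) (heights : List (List Int))
    (n m : Nat) (best : List (List (Option Int))) (a b i j : Nat)
    (hsh : pvShape best n m) (hi : i < n) (hj : j < m) :
    pvOGet (stepB moves heights n m best a b) i j
      = (cList moves heights i j (a, b)).foldl relaxStep (pvOGet best i j) := by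
  unfold stepB
  by_cases hh : pvGet2 heights a b ≠ -1
  · rw [if_pos hh]
    simp only [List.foldl_cons, List.foldl_nil]
    have s1 := pvShape_pvRelaxAt best (pvGet2 heights a b) n m ((a : Int) + 1) (b : Int) (pvGetM moves a b) "down" hsh
    have s2 := pvShape_pvRelaxAt _ (pvGet2 heights a b) n m ((a : Int) - 1) (b : Int) (pvGetM moves a b) "up" s1
    have s3 := pvShape_pvRelaxAt _ (pvGet2 heights a b) n m (a : Int) ((b : Int) + 1) (pvGetM moves a b) "right" s2
    rw [pvOGet_pvRelaxAt _ _ _ _ _ _ _ _ _ _ s3 hi hj,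
      pvOGet_pvRelaxAt _ _ _ _ _ _ _ _ _ _ s2 hi hj,
      pvOGet_pvRelaxAt _ _ _ _ _ _ _ _ _ _ s1 hi hj,
      pvOGet_pvRelaxAt _ _ _ _ _ _ _ _ _ _ hsh hi hj]
    simp only [cList, List.foldl_cons, List.foldl_nil]
    rw [relax_if_down moves heights i j a b _ hh, relax_if_up moves heights i j a b _ hh,
      relax_if_right moves heights i j a b _ hh, relax_if_left moves heights i j a b _ hh]
  · rw [if_neg hh]
    push_neg at hh
    have h1 : cDown moves heights i j (a, b) = none := by simp [cDown, hh]
    have h2 : cUp moves heights i j (a, b) = none := by simp [cUp, hh]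
    have h3 : cRight moves heights i j (a, b) = none := by simp [cRight, hh]
    have h4 : cLeft moves heights i j (a, b) = none := by simp [cLeft, hh]
    simp only [cList, List.foldl_cons, List.foldl_nil, h1, h2, h3, h4, relaxStep_none]

-- ---- lifting the grid fold to a value fold ----

theorem pvOGet_rowfold (moves : List (List (List String))) (heights : List (List Int))
    (n m : Nat) (L : List Nat) (g : List (List (Option Int))) (a i j : Nat)
    (hsh : pvShape g n m) (hi : i < n) (hj : j < m) :
    pvOGet (L.foldl (fun g b => stepB moves heights n m g a b) g) i j
      = L.foldl (fun v b => (cList moves heights i j (a, b)).foldl relaxStep v) (pvOGet g i j) := by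
  induction L generalizing g with
  | nil => rfl
  | cons b t ih =>
    rw [List.foldl_cons, List.foldl_cons, ih _ (pvShape_stepB _ _ _ _ _ _ _ hsh),
      pvOGet_stepB _ _ _ _ _ _ _ _ _ hsh hi hj]

theorem pvShape_rowfold (moves : List (List (List String))) (heights : List (List Int))
    (n m : Nat) (L : List Nat) (g : List (List (Option Int))) (a : Nat)
    (hsh : pvShape g n m) :
    pvShape (L.foldl (fun g b => stepB moves heights n m g a b) g) n m := by
  induction L generalizing g with
  | nil => exact hsh
  | cons b t ih => exact ih _ (pvShape_stepB _ _ _ _ _ _ _ hsh)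

theorem pvOGet_gridfold (moves : List (List (List String))) (heights : List (List Int))
    (n m : Nat) (LA : List Nat) (L : List Nat) (g : List (List (Option Int))) (i j : Nat)
    (hsh : pvShape g n m) (hi : i < n) (hj : j < m) :
    pvOGet (LA.foldl (fun g a => L.foldl (fun g b => stepB moves heights n m g a b) g) g) i j
      = LA.foldl (fun v a => L.foldl (fun v b => (cList moves heights i j (a, b)).foldl relaxStep v) v) (pvOGet g i j) := by
  induction LA generalizing g with
  | nil => rfl
  | cons a t ih =>
    rw [List.foldl_cons, List.foldl_cons, ih _ (pvShape_rowfold _ _ _ _ _ _ _ hsh),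
      pvOGet_rowfold _ _ _ _ _ _ _ _ _ hsh hi hj]

-- ---- evaluating the value fold as an option-minimum ----

theorem foldl_relaxStep_filterMap (cs : List (Option Int)) (v : Option Int) :
    cs.foldl relaxStep v = (cs.filterMap id).foldl (fun v x => relaxStep v (some x)) v := by
  induction cs generalizing v with
  | nil => rfl
  | cons c t ih =>
    cases c with
    | none => rw [List.foldl_cons, List.filterMap_cons]; exact ih v
    | some x => rw [List.foldl_cons, List.filterMap_cons]; exact ih _

theorem toMin_append (cs : List Int) (l : List Int) :
    cs.foldl (fun v x => relaxStep v (some x)) (toMin l) = toMin (l ++ cs) := by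
  induction cs generalizing l with
  | nil => simp
  | cons x t ih =>
    rw [List.foldl_cons]
    have hstep : relaxStep (toMin l) (some x) = toMin (l ++ [x]) := by
      cases l with
      | nil => simp [toMin, PySem.List.min?, relaxStep]
      | cons h t2 =>
        unfold toMin
        rw [PySem.List.min?_id_cons]
        show some (min (t2.foldl min h) x) = _
        rw [List.cons_append, PySem.List.min?_id_cons, List.foldl_append]
        rfl
    rw [hstep, ih]
    simp

theorem min?_eq_of_mem_iff (l1 l2 : List Int) (h : ∀ x, x ∈ l1 ↔ x ∈ l2) :
    PySem.List.min? l1 (fun y => y) = PySem.List.min? l2 (fun y => y) := by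
  cases h1 : PySem.List.min? l1 (fun y => y) with
  | none =>
    have : l1 = [] := (PySem.List.min?_eq_none_iff l1 (fun y => y)).mp h1
    subst this
    cases h2 : PySem.List.min? l2 (fun y => y) with
    | none => rfl
    | some y =>
      have := PySem.List.min?_mem h2
      rw [← h y] at this
      exact absurd this (List.not_mem_nil)
  | some x =>
    cases h2 : PySem.List.min? l2 (fun y => y) with
    | none =>
      have : l2 = [] := (PySem.List.min?_eq_none_iff l2 (fun y => y)).mp h2
      subst this
      have := PySem.List.min?_mem h1
      rw [h x] at this
      exact absurd this (List.not_mem_nil)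
    | some y =>
      have hx : x ∈ l2 := (h x).mp (PySem.List.min?_mem h1)
      have hy : y ∈ l1 := (h y).mpr (PySem.List.min?_mem h2)
      have h12 : x ≤ y := by simpa using PySem.List.min?_isMin h1 y hy
      have h21 : y ≤ x := by simpa using PySem.List.min?_isMin h2 x hx
      rw [le_antisymm h12 h21]

-- ---- membership characterizations ----

theorem mem_ite_singleton (c : Prop) [Decidable c] (v x : Int) :
    (x ∈ if c then [v] else ([] : List Int)) ↔ c ∧ x = v := by
  split_ifs with h <;> simp [h]

theorem mem_bhAvail (moves : List (List (List String))) (heights : List (List Int))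
    (i j : Nat) (sample : List (List String)) (x : Int) :
    x ∈ bhAvail moves heights i j sample ↔
      (pvGet2 heights i j ≠ -1 ∧ x = pvGet2 heights i j)
    ∨ (0 < i ∧ (pvGetM moves (i-1) j).contains "down" = true ∧ pvGet2 heights (i-1) j ≠ -1 ∧ x = pvGet2 heights (i-1) j + 1)
    ∨ (0 < j ∧ (pvGetM moves i (j-1)).contains "right" = true ∧ pvGet2 heights i (j-1) ≠ -1 ∧ x = pvGet2 heights i (j-1) + 1)
    ∨ ((i : Int) < (sample.length : Int) - 1 ∧ (pvGetM moves (i+1) j).contains "up" = true ∧ pvGet2 heights (i+1) j ≠ -1 ∧ x = pvGet2 heights (i+1) j + 1)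
    ∨ ((j : Int) < ((sample.headD []).length : Int) - 1 ∧ (pvGetM moves i (j+1)).contains "left" = true ∧ pvGet2 heights i (j+1) ≠ -1 ∧ x = pvGet2 heights i (j+1) + 1) := by
  unfold bhAvail
  rw [List.mem_append, List.mem_append, List.mem_append, List.mem_append,
    mem_ite_singleton, mem_ite_singleton, mem_ite_singleton, mem_ite_singleton, mem_ite_singleton]
  simp only [and_assoc, or_assoc]

theorem mem_cs (moves : List (List (List String))) (heights : List (List Int))
    (n m i j : Nat) (x : Int) :
    (x ∈ ((List.range n).flatMap (fun a => (List.range m).flatMap (fun b => cList moves heights i j (a, b)))).filterMap id)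
    ↔ ∃ a, a < n ∧ ∃ b, b < m ∧
        (cDown moves heights i j (a, b) = some x ∨ cUp moves heights i j (a, b) = some x
          ∨ cRight moves heights i j (a, b) = some x ∨ cLeft moves heights i j (a, b) = some x) := by
  simp only [List.mem_filterMap, List.mem_flatMap, List.mem_range, cList, List.mem_cons,
    List.not_mem_nil, or_false, id]
  constructor
  · rintro ⟨c, ⟨a, ha, b, hb, hc⟩, rfl⟩
    exact ⟨a, ha, b, hb, by tauto⟩
  · rintro ⟨a, ha, b, hb, hc⟩
    exact ⟨some x, ⟨a, ha, b, hb, by tauto⟩, rfl⟩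

-- the central membership equivalence: scatter contributions = gather candidates
theorem mem_equiv (moves : List (List (List String))) (heights : List (List Int))
    (sample : List (List String)) (i j : Nat)
    (hi : i < sample.length) (hj : j < (sample.headD []).length) (x : Int) :
    x ∈ ((if pvGet2 heights i j ≠ -1 then [pvGet2 heights i j] else [])
          ++ ((List.range sample.length).flatMap (fun a => (List.range (sample.headD []).length).flatMap
                (fun b => cList moves heights i j (a, b)))).filterMap id)
      ↔ x ∈ bhAvail moves heights i j sample := by
  rw [List.mem_append, mem_cs, mem_bhAvail]
  constructor
  · rintro (hown | ⟨a, ha, b, hb, hc⟩)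
    · left
      constructor
      · by_contra hne
        simp [hne] at hown
      · have : pvGet2 heights i j ≠ -1 := by by_contra hne; simp [hne] at hown
        simpa [this] using hown
    · rcases hc with hc | hc | hc | hc
      · unfold cDown at hc
        split_ifs at hc with hcond
        · obtain ⟨hv, he1, he2, hcont⟩ := hcond
          simp only [Option.some_inj] at hc
          refine Or.inr (Or.inl ⟨by omega, ?_, ?_, ?_⟩) <;>
            · have e1 : i - 1 = a := by omega
              have e2 : j = b := by omega
              rw [e1, e2]
              first | exact hcont | exact hv | omega
      · unfold cUp at hc
        split_ifs at hc with hcond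
        · obtain ⟨hv, he1, he2, hcont⟩ := hcond
          simp only [Option.some_inj] at hc
          refine Or.inr (Or.inr (Or.inr (Or.inl ⟨by omega, ?_, ?_, ?_⟩))) <;>
            · have e1 : i + 1 = a := by omega
              have e2 : j = b := by omega
              rw [e1, e2]
              first | exact hcont | exact hv | omega
      · unfold cRight at hc
        split_ifs at hc with hcond
        · obtain ⟨hv, he1, he2, hcont⟩ := hcond
          simp only [Option.some_inj] at hc
          refine Or.inr (Or.inr (Or.inl ⟨by omega, ?_, ?_, ?_⟩)) <;>
            · have e1 : i = a := by omega
              have e2 : j - 1 = b := by omega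
              rw [e1, e2]
              first | exact hcont | exact hv | omega
      · unfold cLeft at hc
        split_ifs at hc with hcond
        · obtain ⟨hv, he1, he2, hcont⟩ := hcond
          simp only [Option.some_inj] at hc
          refine Or.inr (Or.inr (Or.inr (Or.inr ⟨by omega, ?_, ?_, ?_⟩))) <;>
            · have e1 : i = a := by omega
              have e2 : j + 1 = b := by omega
              rw [e1, e2]
              first | exact hcont | exact hv | omega
  · rintro (⟨hv, hx⟩ | ⟨hgt, hcont, hv, hx⟩ | ⟨hgt, hcont, hv, hx⟩ | ⟨hgt, hcont, hv, hx⟩ | ⟨hgt, hcont, hv, hx⟩)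
    · left; simp [hv, hx]
    · refine Or.inr ⟨i - 1, by omega, j, hj, Or.inl ?_⟩
      unfold cDown
      rw [if_pos ⟨hv, by omega, rfl, hcont⟩, hx]
    · refine Or.inr ⟨i, hi, j - 1, by omega, Or.inr (Or.inr (Or.inl ?_))⟩
      unfold cRight
      rw [if_pos ⟨hv, rfl, by omega, hcont⟩, hx]
    · refine Or.inr ⟨i + 1, by omega, j, hj, Or.inr (Or.inl ?_)⟩
      unfold cUp
      rw [if_pos ⟨hv, by omega, rfl, hcont⟩, hx]
    · refine Or.inr ⟨i, hi, j + 1, by omega, Or.inr (Or.inr (Or.inr ?_))⟩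
      unfold cLeft
      rw [if_pos ⟨hv, rfl, by omega, hcont⟩, hx]

-- ---- A's better_height as an option-minimum ----

theorem better_height_toMin (moves : List (List (List String))) (heights : List (List Int))
    (i j : Nat) (sample : List (List String)) :
    better_height moves heights i j sample = (toMin (bhAvail moves heights i j sample)).getD (-1) := by
  unfold better_height toMin
  by_cases hz : (bhAvail moves heights i j sample).length = 0
  · rw [if_pos hz]
    rw [List.length_eq_zero_iff] at hz
    rw [hz]
    rfl
  · rw [if_neg hz]
    cases hb : bhAvail moves heights i j sample with
    | nil => rw [hb] at hz; simp at hz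
    | cons h t => rw [PySem.List.min?_id_cons]; rfl

-- ---- the key per-cell lemma: scatter result = gather result ----

theorem key_cell (moves : List (List (List String))) (heights : List (List Int))
    (sample : List (List String)) (i j : Nat)
    (hi : i < sample.length) (hj : j < (sample.headD []).length) :
    (pvOGet ((List.range sample.length).foldl (fun best a =>
        (List.range (sample.headD []).length).foldl
          (fun best b => stepB moves heights sample.length (sample.headD []).length best a b) best)
      ((List.range sample.length).map (fun i => (List.range (sample.headD []).length).map (fun j =>
        if pvGet2 heights i j ≠ -1 then some (pvGet2 heights i j) else none)))) i j).getD (-1)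
    = better_height moves heights i j sample := by
  set n := sample.length with hn
  set m := (sample.headD []).length with hm
  set init : List (List (Option Int)) := (List.range n).map (fun i => (List.range m).map (fun j =>
    if pvGet2 heights i j ≠ -1 then some (pvGet2 heights i j) else none)) with hinit
  have hrow : ∀ k, k < n → init.getD k [] = (List.range m).map (fun j =>
      if pvGet2 heights k j ≠ -1 then some (pvGet2 heights k j) else none) := by
    intro k hk
    rw [hinit]
    have : k < (List.range n).length := by simpa using hk
    simp [List.getD, hk]
  have hsh : pvShape init n m := by
    refine ⟨by simp [hinit], fun k hk => ?_⟩
    rw [hrow k hk]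
    simp
  have hown : pvOGet init i j = toMin (if pvGet2 heights i j ≠ -1 then [pvGet2 heights i j] else []) := by
    unfold pvOGet
    rw [hrow i hi]
    have : ((List.range m).map (fun j => if pvGet2 heights i j ≠ -1 then some (pvGet2 heights i j) else none)).getD j none
        = (if pvGet2 heights i j ≠ -1 then some (pvGet2 heights i j) else none) := by
      simp [List.getD, hj]
    rw [this]
    by_cases hv : pvGet2 heights i j ≠ -1
    · simp only [if_pos hv]
      unfold toMin
      rw [PySem.List.min?_id_cons]
      rfl
    · simp only [if_neg hv]
      rfl
  rw [pvOGet_gridfold moves heights n m _ _ init i j hsh hi hj]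
  have hflat1 : ∀ (L : List Nat) (v : Option Int) (gg : Nat → List (Option Int)),
      L.foldl (fun v b => (gg b).foldl relaxStep v) v = (L.flatMap gg).foldl relaxStep v := by
    intro L
    induction L with
    | nil => intro v gg; rfl
    | cons b t ih => intro v gg; rw [List.foldl_cons, List.flatMap_cons, List.foldl_append, ih]
  have h2 : (List.range n).foldl (fun v a => (List.range m).foldl
        (fun v b => (cList moves heights i j (a, b)).foldl relaxStep v) v) (pvOGet init i j)
      = ((List.range n).flatMap (fun a => (List.range m).flatMap (fun b => cList moves heights i j (a, b)))).foldl relaxStep (pvOGet init i j) := by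
    rw [← hflat1]
    apply PySem.List.foldl_congr_mem
    intro acc a _
    rw [← hflat1]
  rw [h2, foldl_relaxStep_filterMap, hown, toMin_append]
  rw [better_height_toMin]
  unfold toMin
  rw [min?_eq_of_mem_iff _ _ (mem_equiv moves heights sample i j hi hj)]

-- ---- assembling the theorem ----

theorem update_heights_spec : Claim_equal_update_heights := by
  intro moves heights sample _hdom _hpre
  unfold Spec_update_heights update_heights update_heights_alt
  rcases Nat.eq_zero_or_pos sample.length with hn | hn
  · simp [hn]
  · simp only [if_pos hn]
    apply PySem.List.foldl_congr_mem
    intro st i hi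
    apply PySem.List.foldl_congr_mem
    intro st' j hj
    rw [List.mem_range] at hi hj
    rw [key_cell moves heights sample i j hi hj]
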